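-- pv_equiv track=rewrite | github.com/TsukiHentai/dat-ngua | python/Ôn thi python/Chuẩn hóa chuỗi.py | cht
-- ===== SOURCE A (Python) =====
-- def cht(name):
--     temp1 = name.split()
--     temp2 = []
--     for j in temp1:
--         ten = ''
--         for i in j:
--             if i.isalpha():
--                 ten = ten + i
--         ten = ten.lower()
--         ten = ten.capitalize()
--         if ten.isalpha():
--             temp2.append(ten)
--     tout=' '.join(temp2)
--     return tout
-- ===== SOURCE B (Python) =====
-- def cht(name):
--     out = []
--     cur = ''
--     for c in name:
--         if c.isspace():
--             if cur:
--                 out.append(cur.lower().capitalize())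
--             cur = ''
--         elif c.isalpha():
--             cur += c
--     if cur:
--         out.append(cur.lower().capitalize())
--     return ' '.join(out)
-- ===== Notes on version B (the rewrite author's own statement) =====
-- stated objective: alternative
-- what changed: Replaces split()-then-inner-filter (two nested passes over materialized word lists) with a single left-to-right pass over the characters maintaining a current-word accumulator that is finalized at each whitespace character and at the end.
import Mathlib
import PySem

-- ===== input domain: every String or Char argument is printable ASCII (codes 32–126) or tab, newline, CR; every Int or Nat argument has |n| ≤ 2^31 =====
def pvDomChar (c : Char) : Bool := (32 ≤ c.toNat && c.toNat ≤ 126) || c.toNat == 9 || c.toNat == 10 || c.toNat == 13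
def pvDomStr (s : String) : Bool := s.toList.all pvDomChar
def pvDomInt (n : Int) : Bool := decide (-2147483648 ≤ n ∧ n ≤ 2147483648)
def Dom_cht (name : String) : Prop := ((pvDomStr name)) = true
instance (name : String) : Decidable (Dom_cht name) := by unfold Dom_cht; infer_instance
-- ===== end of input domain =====

-- B replaces split()-plus-inner-filter with a single pass over the characters maintaining a
-- current-word accumulator (alternative decomposition, same cost).

-- str.capitalize(): first char upper-cased, rest lowered (exact on the ASCII domain, where
-- Python's title-case of the first char coincides with upper-case). Used by both ports
-- because both Pythons call .lower().capitalize().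
def pyCap : List Char → List Char
  | [] => []
  | c :: cs => PySem.Chars.upperChar c :: PySem.Chars.lower cs

-- ===== PORT A =====
def cht (name : String) : String :=
  let temp1 := PySem.Chars.split₀ name.toList
  let temp2 := temp1.foldl (fun temp2 j =>
    let ten := j.foldl (fun ten i =>
      if PySem.Chars.isalpha i then ten ++ [i] else ten) ([] : List Char)
    let ten := PySem.Chars.lower ten
    let ten := pyCap ten
    if PySem.Chars.strIsalpha ten then temp2 ++ [ten] else temp2) []
  String.ofList (PySem.Chars.join [' '] temp2)

-- ===== PORT B =====
-- finalize the current word: append cur.lower().capitalize() to out if cur is nonempty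
def chtFin (out : List (List Char)) (cur : List Char) : List (List Char) :=
  if cur.isEmpty then out else out ++ [pyCap (PySem.Chars.lower cur)]

def cht_alt (name : String) : String :=
  let r := name.toList.foldl (fun (s : List (List Char) × List Char) c =>
    if PySem.Chars.isspace c then (chtFin s.1 s.2, [])
    else if PySem.Chars.isalpha c then (s.1, s.2 ++ [c])
    else s) ([], [])
  String.ofList (PySem.Chars.join [' '] (chtFin r.1 r.2))

-- ===== PRECONDITION & SPEC =====
def Spec_cht (name : String) (out : String) : Prop := out = cht_alt name
instance (name : String) (out : String) : Decidable (Spec_cht name out) := by unfold Spec_cht; infer_instance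

-- ===== CLAIM (what is proved, stated in full; the proofs are below) =====
def Claim_equal_cht : Prop := ∀ (name : String), Dom_cht name → Spec_cht name (cht name)

-- ===== LEMMAS AND PROOFS =====

-- the contribution of one raw word to the normalized output
def chtWord (j : List Char) : List (List Char) :=
  if (j.filter PySem.Chars.isalpha).isEmpty then []
  else [pyCap (PySem.Chars.lower (j.filter PySem.Chars.isalpha))]

theorem charLe (a b : Char) : (a ≤ b) ↔ a.toNat ≤ b.toNat := by
  rw [Char.le_def]; exact UInt32.le_iff_toNat_le

theorem alpha_lowerChar (c : Char) (h : PySem.Chars.isalpha c = true) :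
    PySem.Chars.isalpha (PySem.Chars.lowerChar c) = true := by
  simp only [PySem.Chars.isalpha, PySem.Chars.lowerChar, PySem.Chars.isupper, PySem.Chars.islower,
    charLe, Bool.or_eq_true, Bool.and_eq_true, decide_eq_true_eq] at *
  have hA : ('A' : Char).toNat = 65 := rfl
  have hZ : ('Z' : Char).toNat = 90 := rfl
  have ha : ('a' : Char).toNat = 97 := rfl
  have hz : ('z' : Char).toNat = 122 := rfl
  rcases h with h' | h'
  · have hv : (Char.ofNat (c.toNat + 32)).toNat = c.toNat + 32 := by
      rw [Char.toNat_ofNat]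
      have : (c.toNat + 32).isValidChar := Or.inl (by omega)
      simp [this]
    split
    · right; omega
    · omega
  · split
    · omega
    · right; exact h'

theorem alpha_upperChar (c : Char) (h : PySem.Chars.isalpha c = true) :
    PySem.Chars.isalpha (PySem.Chars.upperChar c) = true := by
  simp only [PySem.Chars.isalpha, PySem.Chars.upperChar, PySem.Chars.isupper, PySem.Chars.islower,
    charLe, Bool.or_eq_true, Bool.and_eq_true, decide_eq_true_eq] at *
  have hA : ('A' : Char).toNat = 65 := rfl
  have hZ : ('Z' : Char).toNat = 90 := rfl
  have ha : ('a' : Char).toNat = 97 := rfl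
  have hz : ('z' : Char).toNat = 122 := rfl
  rcases h with h' | h'
  · split
    · omega
    · left; exact h'
  · have hv : (Char.ofNat (c.toNat - 32)).toNat = c.toNat - 32 := by
      rw [Char.toNat_ofNat]
      have : (c.toNat - 32).isValidChar := Or.inl (by omega)
      simp [this]
    split
    · left; omega
    · omega

theorem strIsalpha_cap_lower (t : List Char) (h : ∀ x ∈ t, PySem.Chars.isalpha x = true) :
    PySem.Chars.strIsalpha (pyCap (PySem.Chars.lower t)) = !t.isEmpty := by
  cases t with
  | nil => rfl
  | cons c cs =>
      simp only [PySem.Chars.lower, List.map_cons, pyCap, PySem.Chars.strIsalpha, List.isEmpty_cons,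
        Bool.not_false, List.all_cons, Bool.and_eq_true, List.all_eq_true]
      refine ⟨trivial, ?_, ?_⟩
      · exact alpha_upperChar _ (alpha_lowerChar _ (h c (by simp)))
      · intro x hx
        simp only [List.mem_map] at hx
        obtain ⟨y, ⟨z, hz, rfl⟩, rfl⟩ := hx
        exact alpha_lowerChar _ (alpha_lowerChar _ (h z (by simp [hz])))

-- A's inner for-loop collects exactly the alphabetic characters of the word
theorem inner_eq (j : List Char) :
    j.foldl (fun ten i => if PySem.Chars.isalpha i then ten ++ [i] else ten) ([] : List Char)
      = j.filter PySem.Chars.isalpha := by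
  simpa using PySem.List.foldl_append_if PySem.Chars.isalpha id j []

theorem map_filter_eq_flatMap (l : List (List Char)) :
    (l.filter (fun j => PySem.Chars.strIsalpha (pyCap (PySem.Chars.lower (j.filter PySem.Chars.isalpha))))).map
      (fun j => pyCap (PySem.Chars.lower (j.filter PySem.Chars.isalpha)))
    = l.flatMap chtWord := by
  induction l with
  | nil => rfl
  | cons a l ih =>
      have hP : PySem.Chars.strIsalpha (pyCap (PySem.Chars.lower (a.filter PySem.Chars.isalpha)))
          = !(a.filter PySem.Chars.isalpha).isEmpty :=
        strIsalpha_cap_lower _ (fun x hx => (List.mem_filter.1 hx).2)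
      simp only [List.filter_cons, List.flatMap_cons, chtWord, hP]
      by_cases hE : (a.filter PySem.Chars.isalpha).isEmpty = true
      · simp [hE, ih]
      · simp [hE, ih]

-- A computes the concatenation of chtWord over the split words
theorem cht_eq_flatMap (name : String) :
    cht name = String.ofList (PySem.Chars.join [' ']
      ((PySem.Chars.split₀ name.toList).flatMap chtWord)) := by
  simp only [cht, inner_eq]
  rw [PySem.List.foldl_append_if
    (fun j => PySem.Chars.strIsalpha (pyCap (PySem.Chars.lower (j.filter PySem.Chars.isalpha))))
    (fun j => pyCap (PySem.Chars.lower (j.filter PySem.Chars.isalpha)))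
    (PySem.Chars.split₀ name.toList) []]
  rw [map_filter_eq_flatMap]
  simp

theorem go_acc (cs : List Char) : ∀ cur acc,
    PySem.Chars.split₀.go cs cur acc = acc.reverse ++ PySem.Chars.split₀.go cs cur [] := by
  induction cs with
  | nil => intro cur acc; simp [PySem.Chars.split₀.go]; split <;> simp
  | cons c rest ih =>
      intro cur acc
      simp only [PySem.Chars.split₀.go]
      split
      · split
        · exact ih [] acc
        · rw [ih [] (cur.reverse :: acc), ih [] [cur.reverse]]; simp
      · exact ih (c :: cur) acc

theorem chtFin_eq_word (out : List (List Char)) (rev : List Char) :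
    chtFin out (rev.reverse.filter PySem.Chars.isalpha) = out ++ chtWord rev.reverse := by
  unfold chtFin chtWord
  split <;> simp

-- B's loop invariant: B's accumulator holds the alphabetic characters of the raw word read
-- so far (in reverse, as split₀.go keeps it), and finalizing yields the words of the rest
theorem cht_alt_invariant (cs : List Char) : ∀ (out : List (List Char)) (rev : List Char),
    (fun (s : List (List Char) × List Char) => chtFin s.1 s.2)
      (cs.foldl (fun (s : List (List Char) × List Char) c =>
        if PySem.Chars.isspace c then (chtFin s.1 s.2, [])
        else if PySem.Chars.isalpha c then (s.1, s.2 ++ [c])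
        else s) (out, rev.reverse.filter PySem.Chars.isalpha))
    = out ++ (PySem.Chars.split₀.go cs rev []).flatMap chtWord := by
  induction cs with
  | nil =>
      intro out rev
      simp only [List.foldl_nil, PySem.Chars.split₀.go]
      by_cases h : rev.isEmpty = true
      · have : rev = [] := List.isEmpty_iff.1 h
        subst this; simp [chtFin]
      · simp only [h, List.reverse_nil]
        rw [chtFin_eq_word]
        simp [chtWord]
  | cons c rest ih =>
      intro out rev
      simp only [List.foldl_cons, PySem.Chars.split₀.go]
      by_cases hs : PySem.Chars.isspace c = true
      · simp only [hs, if_true]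
        rw [chtFin_eq_word]
        have h0 := ih (out ++ chtWord rev.reverse) []
        simp only [List.reverse_nil, List.filter_nil] at h0
        rw [h0]
        by_cases he : rev.isEmpty = true
        · have : rev = [] := List.isEmpty_iff.1 he
          subst this
          simp [chtWord]
        · simp only [he]
          rw [go_acc rest [] [rev.reverse]]
          simp
      · simp only [hs]
        by_cases ha : PySem.Chars.isalpha c = true
        · simp only [ha, if_true]
          have : rev.reverse.filter PySem.Chars.isalpha ++ [c]
              = (c :: rev).reverse.filter PySem.Chars.isalpha := by
            simp [List.filter_append, ha]
          rw [this]
          exact ih out (c :: rev)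
        · simp only [ha]
          have : rev.reverse.filter PySem.Chars.isalpha
              = (c :: rev).reverse.filter PySem.Chars.isalpha := by
            simp [List.filter_append, ha]
          rw [this]
          exact ih out (c :: rev)

-- ===== VERDICT (by name: the statement is the Claim_ definition above) =====
theorem cht_spec : Claim_equal_cht := by
  intro name _
  show cht name = cht_alt name
  rw [cht_eq_flatMap]
  have h := cht_alt_invariant name.toList [] []
  simp only [List.reverse_nil, List.filter_nil, List.nil_append] at h
  simp only [cht_alt, h]
  rfl
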